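-- pv_equiv track=rewrite | github.com/ohdana/the-big-book-of-small-python-projects | day52_power_ball/powerballlottery.py | try_parse_numbers
-- ===== SOURCE A (Python) =====
-- def try_parse_numbers(string, n_of_numbers, min_bound, max_bound):
--     string = string.strip()
--     if not string:
--         return False, None
--
--     strings = string.split(' ')
--     if len(strings) != n_of_numbers:
--         return False, None
--
--     all_are_numbers = lambda raw_list: all([element.isdigit() for element in raw_list])
--     if not all_are_numbers(strings):
--         return False, None
--
--     numbers = [int(x)for x in strings]
--     all_are_within_bounds = lambda numbers: all([min_bound <= number <= max_bound for number in numbers])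
--     if not all_are_within_bounds(numbers):
--         return False, None
--
--     return True, numbers
-- ===== SOURCE B (Python) =====
-- def try_parse_numbers(string, n_of_numbers, min_bound, max_bound):
--     # character-level tokenizer: one scan over the stripped string, no split()
--     s = string.strip()
--     if not s:
--         return False, None
--     numbers = []
--     cur = []
--     for ch in s + ' ':          # sentinel space flushes the last token
--         if ch == ' ':
--             if not cur:
--                 return False, None
--             v = int(''.join(cur))
--             if not (min_bound <= v <= max_bound):
--                 return False, None
--             numbers.append(v)
--             cur = []
--         elif ch.isdigit():
--             cur.append(ch)
--         else:
--             return False, None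
--     if len(numbers) != n_of_numbers:
--         return False, None
--     return True, numbers
-- ===== Notes on version B (the rewrite author's own statement) =====
-- stated objective: alternative
-- what changed: B never calls split()/isdigit() on token lists: it tokenizes the stripped string itself in one character-level scan with a sentinel space (digit chars accumulate into the current token, a space flushes it through int() and the bounds check, anything else fails), checking the token count only at the end.
import Mathlib
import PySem

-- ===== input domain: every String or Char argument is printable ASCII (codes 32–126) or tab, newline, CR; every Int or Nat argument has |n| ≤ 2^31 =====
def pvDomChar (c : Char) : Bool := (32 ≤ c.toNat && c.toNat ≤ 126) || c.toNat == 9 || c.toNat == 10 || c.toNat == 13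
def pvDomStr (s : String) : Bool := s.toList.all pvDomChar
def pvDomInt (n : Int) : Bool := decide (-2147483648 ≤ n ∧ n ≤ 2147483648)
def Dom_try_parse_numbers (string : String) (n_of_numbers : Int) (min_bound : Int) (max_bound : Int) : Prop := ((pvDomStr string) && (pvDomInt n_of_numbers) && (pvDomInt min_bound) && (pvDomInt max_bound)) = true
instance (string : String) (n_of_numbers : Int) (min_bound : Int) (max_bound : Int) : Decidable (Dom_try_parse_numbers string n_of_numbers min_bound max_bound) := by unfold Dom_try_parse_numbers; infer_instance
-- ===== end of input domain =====

-- B replaces A's split()-then-three-passes pipeline by a single character-level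
-- tokenizer scan over the stripped string (sentinel space flushes each token).

-- ===== PORT A =====
-- string.split(' ') is ported as (PySem.Str.split? · " ").getD [] (split? is `some` whenever sep ≠ "").
-- int(x) is ported as (PySem.Int.ofStr? x).getD 0; it is only reached after the
-- isdigit pass succeeded, where ofStr? is always `some`, so the default is never used.
def try_parse_numbers (string : String) (n_of_numbers : Int) (min_bound : Int) (max_bound : Int) : Bool × Option (List Int) :=
  let string := PySem.Str.strip string
  if string = "" then (false, none)
  else
    let strings := (PySem.Str.split? string " ").getD []
    if (strings.length : Int) ≠ n_of_numbers then (false, none)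
    else if ¬ ((strings.map (fun element => PySem.Str.strIsdigit element)).all (fun b => b)) then (false, none)
    else
      let numbers := strings.map (fun x => (PySem.Int.ofStr? x).getD 0)
      if ¬ ((numbers.map (fun number => decide (min_bound ≤ number) && decide (number ≤ max_bound))).all (fun b => b)) then (false, none)
      else (true, some numbers)

-- ===== PORT B =====
-- Source B's character loop: state = (remaining chars, current token buffer `cur`, numbers so far);
-- a space flushes `cur` through int() (ported as (PySem.Int.ofStr? (String.ofList cur)).getD 0,
-- reached only with `cur` a nonempty digit buffer, where ofStr? is `some`) and the bounds check;
-- ch.isdigit() on the single char is PySem.Chars.isdigit.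
def tpnScan (min_bound max_bound : Int) : List Char → List Char → List Int → Option (List Int)
  | [], _cur, numbers => some numbers
  | ch :: rest, cur, numbers =>
    if ch = ' ' then
      if cur = [] then none
      else
        let v := (PySem.Int.ofStr? (String.ofList cur)).getD 0
        if ¬ (min_bound ≤ v ∧ v ≤ max_bound) then none
        else tpnScan min_bound max_bound rest [] (numbers ++ [v])
    else if PySem.Chars.isdigit ch then tpnScan min_bound max_bound rest (cur ++ [ch]) numbers
    else none

def try_parse_numbers_alt (string : String) (n_of_numbers : Int) (min_bound : Int) (max_bound : Int) : Bool × Option (List Int) :=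
  let s := PySem.Str.strip string
  if s = "" then (false, none)
  else
    match tpnScan min_bound max_bound (s.toList ++ [' ']) [] [] with
    | none => (false, none)
    | some numbers => if (numbers.length : Int) ≠ n_of_numbers then (false, none) else (true, some numbers)

-- ===== PRECONDITION & SPEC =====
def Spec_try_parse_numbers (string : String) (n_of_numbers : Int) (min_bound : Int) (max_bound : Int) (out : Bool × Option (List Int)) : Prop := out = try_parse_numbers_alt string n_of_numbers min_bound max_bound
instance (string : String) (n_of_numbers : Int) (min_bound : Int) (max_bound : Int) (out : Bool × Option (List Int)) : Decidable (Spec_try_parse_numbers string n_of_numbers min_bound max_bound out) := by unfold Spec_try_parse_numbers; infer_instance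

-- ===== CLAIM (what is proved, stated in full; the proofs are below) =====
def Claim_equal_try_parse_numbers : Prop := ∀ (string : String) (n_of_numbers : Int) (min_bound : Int) (max_bound : Int), Dom_try_parse_numbers string n_of_numbers min_bound max_bound → Spec_try_parse_numbers string n_of_numbers min_bound max_bound (try_parse_numbers string n_of_numbers min_bound max_bound)

-- ===== LEMMAS AND PROOFS =====

-- proof-side model of str.split(' '): accumulate the current piece `pre` front-to-back
def mySplit : List Char → List Char → List (List Char)
  | pre, [] => [pre]
  | pre, c :: rest => if c = ' ' then pre :: mySplit [] rest else mySplit (pre ++ [c]) rest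

lemma go_eq_mySplit : ∀ (fuel : Nat) (l cur : List Char) (acc : List (List Char)),
    l.length < fuel →
    PySem.Chars.splitOn.go [' '] fuel l cur acc = acc.reverse ++ mySplit cur.reverse l := by
  intro fuel
  induction fuel with
  | zero => intro l cur acc h; omega
  | succ fuel ih =>
    intro l cur acc h
    cases l with
    | nil => simp [PySem.Chars.splitOn.go, mySplit]
    | cons c rest =>
      by_cases hc : c = ' '
      · subst hc
        simp only [PySem.Chars.splitOn.go, List.isPrefixOf, BEq.rfl, Bool.true_and,
          if_true, List.length_cons, List.drop_succ_cons, mySplit]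
        simp only [List.length_nil, List.drop_zero]
        rw [ih rest [] (cur.reverse :: acc) (by simp at h ⊢; omega)]
        simp
      · have hpre : [' '].isPrefixOf (c :: rest) = false := by
          simp [List.isPrefixOf]; exact fun h' => (hc h'.symm).elim
        simp only [PySem.Chars.splitOn.go, hpre, Bool.false_eq_true, if_false]
        rw [ih rest (c :: cur) acc (by simp at h ⊢; omega)]
        simp [mySplit, hc]

lemma splitOn_eq_mySplit (cs : List Char) :
    PySem.Chars.splitOn cs [' '] = mySplit [] cs := by
  have := go_eq_mySplit (cs.length + 1) cs [] [] (by omega)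
  simpa [PySem.Chars.splitOn] using this

-- a token buffer already containing a non-digit poisons the whole split
lemma mySplit_not_digit : ∀ (cs pre : List Char),
    pre.all PySem.Chars.isdigit = false →
    (mySplit pre cs).all PySem.Chars.strIsdigit = false := by
  intro cs
  induction cs with
  | nil =>
    intro pre h
    simp [mySplit, PySem.Chars.strIsdigit, h]
  | cons c rest ih =>
    intro pre h
    by_cases hc : c = ' '
    · subst hc
      simp [mySplit, PySem.Chars.strIsdigit, h]
    · have : (pre ++ [c]).all PySem.Chars.isdigit = false := by simp [h]
      simp [mySplit, hc, ih _ this]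

-- the character scan equals "all tokens digits, then all values in bounds, then the values"
lemma tpnScan_eq (lo hi : Int) : ∀ (cs cur : List Char) (numbers : List Int),
    cur.all PySem.Chars.isdigit = true →
    tpnScan lo hi (cs ++ [' ']) cur numbers =
      (if (mySplit cur cs).all PySem.Chars.strIsdigit then
        (if ((mySplit cur cs).map (fun t => (PySem.Int.ofChars? t).getD 0)).all
              (fun v => decide (lo ≤ v) && decide (v ≤ hi)) then
          some (numbers ++ (mySplit cur cs).map (fun t => (PySem.Int.ofChars? t).getD 0))
        else none)
      else none) := by
  intro cs
  induction cs with
  | nil =>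
    intro cur numbers hcur
    by_cases h0 : cur = []
    · subst h0; simp [tpnScan, mySplit, PySem.Chars.strIsdigit]
    · have hd : PySem.Chars.strIsdigit cur = true := by
        simp [PySem.Chars.strIsdigit, hcur, h0]
      by_cases hb : lo ≤ (PySem.Int.ofChars? cur).getD 0 ∧ (PySem.Int.ofChars? cur).getD 0 ≤ hi
      · simp [tpnScan, mySplit, h0, hd, hb.1, hb.2]
      · rcases not_and_or.mp hb with h | h <;>
          simp [tpnScan, mySplit, h0, hd, h]
  | cons c rest ih =>
    intro cur numbers hcur
    by_cases hc : c = ' '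
    · subst hc
      by_cases h0 : cur = []
      · subst h0; simp [tpnScan, mySplit, PySem.Chars.strIsdigit]
      · have hd : PySem.Chars.strIsdigit cur = true := by
          simp [PySem.Chars.strIsdigit, hcur, h0]
        by_cases hb : lo ≤ (PySem.Int.ofChars? cur).getD 0 ∧ (PySem.Int.ofChars? cur).getD 0 ≤ hi
        · have := ih [] (numbers ++ [(PySem.Int.ofChars? cur).getD 0]) (by simp)
          simp only [List.cons_append, tpnScan, h0,
            PySem.Int.ofStr?_ofList, hb, if_false, this, mySplit]
          simp only [if_true, List.append_assoc]
          simp [hd, hb.1, hb.2]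
        · rcases not_and_or.mp hb with h | h <;>
            · simp only [List.cons_append, tpnScan, if_neg h0, PySem.Int.ofStr?_ofList]
              simp only [mySplit]
              simp [hd, h]
    · by_cases hdig : PySem.Chars.isdigit c
      · have := ih (cur ++ [c]) numbers (by simp [hcur, hdig])
        simp only [List.cons_append, tpnScan, hc, if_false, hdig, if_true, this, mySplit]
      · have hpoison : (cur ++ [c]).all PySem.Chars.isdigit = false := by
          simp [hdig]
        have := mySplit_not_digit rest (cur ++ [c]) hpoison
        simp only [List.cons_append, tpnScan, hc, if_false, hdig, Bool.false_eq_true, mySplit]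
        simp [this]

-- ===== VERDICT (by name: the statement is the Claim_ definition above) =====
theorem try_parse_numbers_spec : Claim_equal_try_parse_numbers := by
  intro string n_of_numbers min_bound max_bound _
  show try_parse_numbers string n_of_numbers min_bound max_bound =
    try_parse_numbers_alt string n_of_numbers min_bound max_bound
  simp only [try_parse_numbers, try_parse_numbers_alt]
  generalize PySem.Str.strip string = st
  by_cases h0 : st = ""
  · rw [if_pos h0, if_pos h0]
  · rw [if_neg h0, if_neg h0]
    rw [tpnScan_eq min_bound max_bound st.toList [] [] (by simp)]
    have hsplit : (PySem.Str.split? st " ").getD [] = (mySplit [] st.toList).map String.ofList := by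
      simp [PySem.Str.split?, PySem.Chars.split?, splitOn_eq_mySplit]
    rw [hsplit]
    generalize mySplit [] st.toList = toks
    have hlen : ((toks.map String.ofList).length : Int) = (toks.length : Int) := by simp
    have hdig : ((toks.map String.ofList).map (fun element => PySem.Str.strIsdigit element)).all (fun b => b)
        = toks.all PySem.Chars.strIsdigit := by
      simp [List.all_map, Function.comp_def]
    have hnum : (toks.map String.ofList).map (fun x => (PySem.Int.ofStr? x).getD 0)
        = toks.map (fun t => (PySem.Int.ofChars? t).getD 0) := by
      simp [Function.comp_def]
    rw [hlen, hdig, hnum]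
    by_cases hD : toks.all PySem.Chars.strIsdigit
    · by_cases hB : (toks.map (fun t => (PySem.Int.ofChars? t).getD 0)).all
          (fun v => decide (min_bound ≤ v) && decide (v ≤ max_bound))
      · have hB' : ∀ v ∈ toks.map (fun t => (PySem.Int.ofChars? t).getD 0),
            min_bound ≤ v ∧ v ≤ max_bound := by simpa using hB
        have hno : ¬ (∃ x ∈ toks, min_bound ≤ (PySem.Int.ofChars? x).getD 0 →
            max_bound < (PySem.Int.ofChars? x).getD 0) := by
          rintro ⟨t, ht, himp⟩
          have hv := hB' _ (List.mem_map_of_mem ht)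
          have := himp hv.1
          omega
        simp only [hD, if_true, hB, List.nil_append]
        by_cases hn : ((toks.length : Int) = n_of_numbers)
        · simp [hn, hno]
        · simp [hn, List.length_map]
      · have hB' : ∃ v ∈ toks.map (fun t => (PySem.Int.ofChars? t).getD 0),
            ¬ (min_bound ≤ v ∧ v ≤ max_bound) := by
          simpa [List.all_eq_true, not_forall] using hB
        have hcond : ∃ x ∈ toks, min_bound ≤ (PySem.Int.ofChars? x).getD 0 →
            max_bound < (PySem.Int.ofChars? x).getD 0 := by
          obtain ⟨v, hv, hvb⟩ := hB'
          simp only [List.mem_map] at hv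
          obtain ⟨t, ht, rfl⟩ := hv
          refine ⟨t, ht, fun hle => ?_⟩
          by_contra hng
          exact hvb ⟨hle, by omega⟩
        simp only [hD, if_true, hB, Bool.false_eq_true, if_false]
        by_cases hn : ((toks.length : Int) = n_of_numbers) <;>
          simp [hn, hcond]
    · simp only [hD, Bool.false_eq_true, if_false]
      by_cases hn : ((toks.length : Int) = n_of_numbers) <;>
        simp_all
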